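-- pv_equiv track=rewrite | github.com/Wensomt/danmakuweb | main.py | wordly_create_try_helper
-- ===== SOURCE A (Python) =====
-- def wordly_create_try_helper(today, our):
--     wrong = f'color: red'
--     something = f'color: orange'
--     good = f'color: green'
--
--     have = len(today)
--     our_have = len(our)
--     agreed = 0
--     for y in today:
--         for z in our:
--             if z == y:
--                 agreed += 1
--
--     entire_string = ''
--     for x in our:
--         entire_string+= ' '+x
--
--     if agreed == have and have == our_have:
--         return [entire_string.strip(), good]
--     elif agreed > 0 :
--         return [entire_string.strip(), something]
--     else:
--         return  [entire_string.strip(),wrong]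
-- ===== SOURCE B (Python) =====
-- def wordly_create_try_helper(today, our):
--     t = sorted(today)
--     o = sorted(our)
--     agreed = 0
--     i = j = 0
--     while i < len(t) and j < len(o):
--         if t[i] < o[j]:
--             i += 1
--         elif o[j] < t[i]:
--             j += 1
--         else:
--             v = t[i]
--             i2, j2 = i, j
--             while i2 < len(t) and t[i2] == v:
--                 i2 += 1
--             while j2 < len(o) and o[j2] == v:
--                 j2 += 1
--             agreed += (i2 - i) * (j2 - j)
--             i, j = i2, j2
--     joined = ' '.join(our).strip()
--     if agreed == len(today) == len(our):
--         return [joined, 'color: green']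
--     if agreed > 0:
--         return [joined, 'color: orange']
--     return [joined, 'color: red']
-- ===== Notes on version B (the rewrite author's own statement) =====
-- stated objective: faster
-- what changed: Replaces the nested today-by-our pair-counting loops with sort-then-merge: both lists are sorted and walked with two pointers, adding the product of equal-run lengths for each shared value; the joined string is built with ' '.join plus one strip instead of repeated concatenation; the three-way color branch is unchanged.
import Mathlib
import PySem

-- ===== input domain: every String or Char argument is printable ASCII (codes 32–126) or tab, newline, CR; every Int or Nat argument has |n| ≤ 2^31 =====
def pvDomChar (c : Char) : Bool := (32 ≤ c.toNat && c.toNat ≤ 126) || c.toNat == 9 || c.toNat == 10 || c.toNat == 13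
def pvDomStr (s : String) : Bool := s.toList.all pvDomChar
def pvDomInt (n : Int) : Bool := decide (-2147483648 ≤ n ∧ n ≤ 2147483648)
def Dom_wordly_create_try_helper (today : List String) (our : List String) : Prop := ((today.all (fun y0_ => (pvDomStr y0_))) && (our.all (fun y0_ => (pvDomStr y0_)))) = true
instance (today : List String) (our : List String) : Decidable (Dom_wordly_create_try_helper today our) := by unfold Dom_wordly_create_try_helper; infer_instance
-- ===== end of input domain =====

-- B replaces the quadratic nested pair count with sort-then-merge: both lists are sorted and
-- walked with two pointers, adding the product of equal-run lengths (objective: faster on the count).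

-- ===== PORT A =====
def wordly_create_try_helper (today : List String) (our : List String) : List String :=
  let wrong : String := "color: red"
  let something : String := "color: orange"
  let good : String := "color: green"
  let haveN : Int := today.length
  let our_have : Int := our.length
  let agreed : Int :=
    today.foldl (fun acc y => our.foldl (fun acc z => if z == y then acc + 1 else acc) acc) 0
  let entire_string : String := our.foldl (fun s x => s ++ " " ++ x) ""
  if agreed = haveN ∧ haveN = our_have then [PySem.Str.strip entire_string, good]
  else if agreed > 0 then [PySem.Str.strip entire_string, something]
  else [PySem.Str.strip entire_string, wrong]

-- ===== PORT B =====
-- Source B's two-pointer walk over the two sorted lists: the inner run-measuring while-loops are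
-- takeWhile/dropWhile on the tails, the outer while is this structural recursion.
def mergeCount : List String → List String → Int
  | [], _ => 0
  | _ :: _, [] => 0
  | x :: xs, y :: ys =>
    if x < y then mergeCount xs (y :: ys)
    else if y < x then mergeCount (x :: xs) ys
    else
      (((xs.takeWhile (· == x)).length : Int) + 1) * (((ys.takeWhile (· == x)).length : Int) + 1)
        + mergeCount (xs.dropWhile (· == x)) (ys.dropWhile (· == x))
termination_by a b => a.length + b.length
decreasing_by
  all_goals
    (try (have h1 := List.length_dropWhile_le (p := (· == x)) (l := xs);
          have h2 := List.length_dropWhile_le (p := (· == x)) (l := ys)));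
    simp_all; try omega

def wordly_create_try_helper_alt (today : List String) (our : List String) : List String :=
  let t := PySem.List.sorted today (fun x => x) false
  let o := PySem.List.sorted our (fun x => x) false
  let agreed : Int := mergeCount t o
  let joined : String := PySem.Str.strip (PySem.Str.join " " our)
  if agreed = (today.length : Int) ∧ (today.length : Int) = (our.length : Int) then
    [joined, "color: green"]
  else if agreed > 0 then [joined, "color: orange"]
  else [joined, "color: red"]

-- ===== PRECONDITION & SPEC =====
def Spec_wordly_create_try_helper (today : List String) (our : List String) (out : List String) : Prop := out = wordly_create_try_helper_alt today our
instance (today : List String) (our : List String) (out : List String) : Decidable (Spec_wordly_create_try_helper today our out) := by unfold Spec_wordly_create_try_helper; infer_instance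

-- ===== CLAIM (what is proved, stated in full; the proofs are below) =====
def Claim_equal_wordly_create_try_helper : Prop := ∀ (today : List String) (our : List String), Dom_wordly_create_try_helper today our → Spec_wordly_create_try_helper today our (wordly_create_try_helper today our)

-- ===== LEMMAS AND PROOFS =====

-- A's nested counting loop, from any accumulator, is the sum of occurrence counts.
theorem agreed_eq (today our : List String) (a : Int) :
    today.foldl (fun acc y => our.foldl (fun acc z => if z == y then acc + 1 else acc) acc) a
      = a + (today.map (fun y => (our.count y : Int))).sum := by
  induction today generalizing a with
  | nil => simp
  | cons h t ih =>
      simp only [List.foldl_cons, List.map_cons, List.sum_cons]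
      rw [ih, PySem.List.foldl_if_add_one (fun z => z == h) our a]
      simp [List.count]
      ring

-- after dropping the leading x-run of a sorted list of elements ≥ x, everything is > x
theorem mem_dropWhile_gt (x : String) (l : List String) (hl : l.Pairwise (· ≤ ·))
    (hge : ∀ t ∈ l, x ≤ t) : ∀ t ∈ l.dropWhile (· == x), x < t := by
  induction l with
  | nil => simp
  | cons h tl ih =>
      by_cases hx : h = x
      · subst hx
        simpa using ih (List.Pairwise.of_cons hl) (fun t ht => (List.rel_of_pairwise_cons hl ht))
      · rw [List.dropWhile_cons_of_neg (by simpa using hx)]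
        intro t ht
        rcases List.mem_cons.mp ht with rfl | ht
        · exact lt_of_le_of_ne (hge t (List.mem_cons_self)) (Ne.symm hx)
        · exact lt_of_lt_of_le
            (lt_of_le_of_ne (hge h List.mem_cons_self) (Ne.symm hx))
            (List.rel_of_pairwise_cons hl ht)

-- mergeCount on two sorted lists is exactly A's pair count.
theorem mergeCount_eq (xs ys : List String)
    (hx : xs.Pairwise (· ≤ ·)) (hy : ys.Pairwise (· ≤ ·)) :
    mergeCount xs ys = (xs.map (fun t => (ys.count t : Int))).sum := by
  induction xs, ys using mergeCount.induct with
  | case1 ys => simp [mergeCount]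
  | case2 x xs => rw [mergeCount]; simp
  | case3 x xs y ys hlt ih =>
      rw [mergeCount, if_pos hlt]
      have hycnt : (y :: ys).count x = 0 := by
        rw [List.count_eq_zero]
        intro hmem
        rcases List.mem_cons.mp hmem with rfl | hmem
        · exact absurd hlt (lt_irrefl x)
        · exact absurd (lt_of_lt_of_le hlt (List.rel_of_pairwise_cons hy hmem)) (lt_irrefl x)
      rw [ih (List.Pairwise.of_cons hx) hy]
      simp [hycnt]
  | case4 x xs y ys h1 h2 ih =>
      rw [mergeCount, if_neg h1, if_pos h2]
      rw [ih hx (List.Pairwise.of_cons hy)]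
      apply congrArg List.sum
      apply List.map_congr_left
      intro t ht
      have hxt : x ≤ t := by
        rcases List.mem_cons.mp ht with rfl | ht
        · exact le_refl t
        · exact List.rel_of_pairwise_cons hx ht
      have hne : t ≠ y := fun h => absurd (lt_of_lt_of_le h2 hxt) (by simp [h])
      simp [Ne.symm hne]
  | case5 x xs y ys h1 h2 ih =>
      have hxy : x = y := le_antisymm (not_lt.mp h2) (not_lt.mp h1)
      subst hxy
      rw [mergeCount, if_neg h1, if_neg h2]
      have hx' := List.Pairwise.of_cons hx
      have hy' := List.Pairwise.of_cons hy
      have hdx := mem_dropWhile_gt x xs hx' (fun t ht => List.rel_of_pairwise_cons hx ht)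
      have hdy := mem_dropWhile_gt x ys hy' (fun t ht => List.rel_of_pairwise_cons hy ht)
      have htx : ∀ t ∈ xs.takeWhile (· == x), t = x := fun t ht => by
        simpa using List.mem_takeWhile_imp ht
      have hty : ∀ t ∈ ys.takeWhile (· == x), t = x := fun t ht => by
        simpa using List.mem_takeWhile_imp ht
      have hcydrop : (ys.dropWhile (· == x)).count x = 0 := by
        rw [List.count_eq_zero]; intro hmem; exact absurd (hdy x hmem) (lt_irrefl x)
      have hcytake : (ys.takeWhile (· == x)).count x = (ys.takeWhile (· == x)).length := by
        rw [List.count_eq_length]; intro b hb; simp [hty b hb]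
      have hcys : ys.count x = (ys.takeWhile (· == x)).length := by
        conv_lhs => rw [← List.takeWhile_append_dropWhile (p := (· == x)) (l := ys)]
        rw [List.count_append, hcytake, hcydrop]; omega
      have hcount_x : (((x :: ys).count x : Int))
          = ((ys.takeWhile (· == x)).length : Int) + 1 := by
        rw [List.count_cons_self, hcys]; push_cast; ring
      have ihp := ih (List.Pairwise.sublist (List.dropWhile_sublist _) hx')
                     (List.Pairwise.sublist (List.dropWhile_sublist _) hy')
      have htake : ((xs.takeWhile (· == x)).map (fun t => (((x :: ys).count t : Int)))).sum
          = ((xs.takeWhile (· == x)).length : Int) * (((ys.takeWhile (· == x)).length : Int) + 1) := by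
        have e1 : (xs.takeWhile (· == x)).map (fun t => (((x :: ys).count t : Int)))
            = (xs.takeWhile (· == x)).map (fun _ => (((x :: ys).count x : Int))) :=
          List.map_congr_left (fun t ht => by rw [htx t ht])
        rw [e1, List.map_const', List.sum_replicate, nsmul_eq_mul, hcount_x]
      have hdrop : ((xs.dropWhile (· == x)).map (fun t => (((x :: ys).count t : Int)))).sum
          = ((xs.dropWhile (· == x)).map (fun t => ((ys.dropWhile (· == x)).count t : Int))).sum := by
        apply congrArg List.sum
        apply List.map_congr_left
        intro t ht
        have hgt := hdx t ht
        have hne : t ≠ x := fun h => absurd hgt (by simp [h])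
        have hcyt : (ys.takeWhile (· == x)).count t = 0 := by
          rw [List.count_eq_zero]; intro hmem; exact hne (hty t hmem)
        have hs : ys.count t = (ys.dropWhile (· == x)).count t := by
          conv_lhs => rw [← List.takeWhile_append_dropWhile (p := (· == x)) (l := ys)]
          rw [List.count_append, hcyt]; simp
        simp [Ne.symm hne, hs]
      have hsum : ((x :: xs).map (fun t => (((x :: ys).count t : Int)))).sum
          = (((xs.takeWhile (· == x)).length : Int) + 1) * (((ys.takeWhile (· == x)).length : Int) + 1)
            + ((xs.dropWhile (· == x)).map (fun t => ((ys.dropWhile (· == x)).count t : Int))).sum := by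
        conv_lhs => rw [show (x :: xs) = x :: (xs.takeWhile (· == x) ++ xs.dropWhile (· == x)) by
          rw [List.takeWhile_append_dropWhile]]
        rw [List.map_cons, List.map_append, List.sum_cons, List.sum_append, htake, hdrop, hcount_x]
        ring
      rw [hsum, ihp]

-- strings: A's accumulated string, stripped, equals strip(join(our))
theorem strip_cons_space (l : List Char) :
    PySem.Chars.strip (' ' :: l) = PySem.Chars.strip l := by
  simp [PySem.Chars.strip, PySem.Chars.lstrip, PySem.Chars.isspace]

theorem entire_toList (our : List String) (acc : String) :
    (our.foldl (fun s x => s ++ " " ++ x) acc).toList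
      = acc.toList ++ our.flatMap (fun x => ' ' :: x.toList) := by
  induction our generalizing acc with
  | nil => simp
  | cons h t ih => simp [ih, List.append_assoc]

theorem flatMap_eq_cons_join (h : List Char) (t : List (List Char)) :
    (h :: t).flatMap (fun x => ' ' :: x) = ' ' :: PySem.Chars.join [' '] (h :: t) := by
  induction t generalizing h with
  | nil => simp [PySem.Chars.join_singleton]
  | cons h2 t2 ih =>
      rw [PySem.Chars.join_cons_cons]
      simp only [List.flatMap_cons] at ih ⊢
      have h3 : h2 ++ List.flatMap (fun x => ' ' :: x) t2
          = PySem.Chars.join [' '] (h2 :: t2) := by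
        have := ih h2; simpa using this
      simp [h3]

theorem strings_eq (our : List String) :
    PySem.Str.strip (our.foldl (fun s x => s ++ " " ++ x) "")
      = PySem.Str.strip (PySem.Str.join " " our) := by
  apply String.toList_inj.mp
  rw [PySem.Str.toList_strip, PySem.Str.toList_strip, PySem.Str.toList_join,
    entire_toList]
  cases our with
  | nil => simp [PySem.Chars.join, List.intercalate]
  | cons h t =>
      rw [show ((h :: t).flatMap (fun x => ' ' :: x.toList))
            = ((h :: t).map String.toList).flatMap (fun x => ' ' :: x) by
          simp [List.flatMap_map]]
      rw [List.map_cons, flatMap_eq_cons_join,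
        show "".toList = ([] : List Char) from rfl, List.nil_append, strip_cons_space]
      rfl

-- B's sorted-merge count equals A's nested count on the unsorted lists.
theorem counts_eq (today our : List String) :
    mergeCount (PySem.List.sorted today (fun x => x) false)
               (PySem.List.sorted our (fun x => x) false)
      = (today.map (fun y => (our.count y : Int))).sum := by
  rw [mergeCount_eq _ _ (PySem.List.sorted_pairwise today _) (PySem.List.sorted_pairwise our _)]
  rw [List.map_congr_left (fun t _ => by
    rw [(PySem.List.sorted_perm our (fun x => x) false).count_eq t])]
  exact ((PySem.List.sorted_perm today (fun x => x) false).map _).sum_eq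

-- ===== VERDICT (by name: the statement is the Claim_ definition above) =====
theorem wordly_create_try_helper_spec : Claim_equal_wordly_create_try_helper := by
  intro today our _
  unfold Spec_wordly_create_try_helper wordly_create_try_helper wordly_create_try_helper_alt
  simp only [agreed_eq today our 0, zero_add, strings_eq, counts_eq]
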